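-- pv_equiv track=rewrite | github.com/Danor93/Smart-Code-Reviewer | examples/performance_code.py | process_large_dataset_slow
-- ===== SOURCE A (Python) =====
-- def process_large_dataset_slow(data):
--     """Process large dataset - MEMORY INEFFICIENT version"""
--
--     # PERFORMANCE ISSUE: Loading all data into memory at once
--     results = []
--
--     # PERFORMANCE ISSUE: Creating new lists instead of generators
--     squared_data = [x**2 for x in data]
--     filtered_data = [x for x in squared_data if x > 100]
--     final_data = [x * 2 for x in filtered_data]
--
--     # PERFORMANCE ISSUE: Inefficient string concatenation
--     result_string = ""
--     for item in final_data:
--         result_string += str(item) + ","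
--
--     return result_string
-- ===== SOURCE B (Python) =====
-- def process_large_dataset_slow(data):
--     """Single pass: square, filter on the square, double, join with trailing commas."""
--     return "".join(str(x * x * 2) + "," for x in data if x * x > 100)
-- ===== Notes on version B (the rewrite author's own statement) =====
-- stated objective: simpler
-- what changed: Fused the three intermediate list comprehensions and the quadratic string-concatenation loop into one generator expression fed to ''.join, building the CSV string in a single pass with no intermediate lists.
import Mathlib
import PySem

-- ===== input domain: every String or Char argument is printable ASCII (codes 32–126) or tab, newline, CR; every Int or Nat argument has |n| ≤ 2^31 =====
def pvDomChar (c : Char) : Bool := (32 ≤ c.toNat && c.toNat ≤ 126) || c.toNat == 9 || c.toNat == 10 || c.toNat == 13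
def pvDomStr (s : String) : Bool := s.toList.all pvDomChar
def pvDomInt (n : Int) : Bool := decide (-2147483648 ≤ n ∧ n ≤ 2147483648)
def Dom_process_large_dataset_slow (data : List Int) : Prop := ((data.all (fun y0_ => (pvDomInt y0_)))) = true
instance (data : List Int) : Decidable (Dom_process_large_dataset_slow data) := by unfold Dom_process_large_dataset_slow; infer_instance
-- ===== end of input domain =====

-- B fuses A's three intermediate lists and quadratic concatenation loop into one filterMap pass joined into the CSV string (objective: simpler).


-- ===== PORT A =====
-- literal port of A: three intermediate lists, then a string-concatenation fold
def process_large_dataset_slow (data : List Int) : String :=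
  let squared_data := data.map (fun x => x ^ 2)
  let filtered_data := squared_data.filter (fun x => 100 < x)
  let final_data := filtered_data.map (fun x => x * 2)
  final_data.foldl (fun result_string item => result_string ++ PySem.Int.toStr item ++ ",") ""

-- ===== PORT B =====
-- port of B: one pass (filterMap = the generator with its if-filter), joined
def process_large_dataset_slow_alt (data : List Int) : String :=
  String.join (data.filterMap (fun x => if 100 < x * x then some (PySem.Int.toStr (x * x * 2) ++ ",") else none))

-- ===== PRECONDITION & SPEC =====
def Spec_process_large_dataset_slow (data : List Int) (out : String) : Prop := out = process_large_dataset_slow_alt data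
instance (data : List Int) (out : String) : Decidable (Spec_process_large_dataset_slow data out) := by unfold Spec_process_large_dataset_slow; infer_instance

-- ===== CLAIM (what is proved, stated in full; the proofs are below) =====
def Claim_equal_process_large_dataset_slow : Prop := ∀ (data : List Int), Dom_process_large_dataset_slow data → Spec_process_large_dataset_slow data (process_large_dataset_slow data)

-- ===== LEMMAS AND PROOFS =====

-- ===== VERDICT (by name: the statement is the Claim_ definition above) =====
theorem string_foldl_append (l : List String) (a : String) :
    l.foldl (fun r s => r ++ s) a = a ++ l.foldl (fun r s => r ++ s) "" := by
  induction l generalizing a with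
  | nil => simp
  | cons x xs ih =>
      simp only [List.foldl]
      rw [ih ("" ++ x), ih (a ++ x)]
      simp [String.append_assoc]

theorem string_join_cons (s : String) (l : List String) :
    String.join (s :: l) = s ++ String.join l := by
  simp only [String.join, List.foldl]
  rw [string_foldl_append]
  simp

-- fold with string accumulator = accumulator ++ join of the pieces
theorem foldl_concat_join (l : List Int) (acc : String) :
    l.foldl (fun s item => s ++ PySem.Int.toStr item ++ ",") acc
      = acc ++ String.join (l.map fun i => PySem.Int.toStr i ++ ",") := by
  induction l generalizing acc with
  | nil => simp [String.join]
  | cons x xs ih =>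
      simp only [List.foldl, List.map_cons, string_join_cons, ih]
      simp [String.append_assoc]

-- A's three passes produce exactly B's filterMap pieces
theorem pieces_eq (data : List Int) :
    (((data.map (fun x => x ^ 2)).filter (fun x => 100 < x)).map (fun x => x * 2)).map
        (fun i => PySem.Int.toStr i ++ ",")
      = data.filterMap (fun x => if 100 < x * x then some (PySem.Int.toStr (x * x * 2) ++ ",") else none) := by
  induction data with
  | nil => rfl
  | cons x xs ih =>
      simp only [List.map_cons, List.filter_cons, List.filterMap_cons]
      have hsq : x ^ 2 = x * x := by ring
      by_cases h : 100 < x * x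
      · simp [hsq, h, ih]
      · simp [hsq, h, ih]

-- ===== VERDICT (by name: the statement is the Claim_ definition above) =====
theorem process_large_dataset_slow_spec : Claim_equal_process_large_dataset_slow := by
  intro data _
  unfold Spec_process_large_dataset_slow process_large_dataset_slow process_large_dataset_slow_alt
  rw [foldl_concat_join, pieces_eq]
  simp
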